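-- pv_equiv track=rewrite | github.com/zhouminping/nlp-tools | semantic_role_labeling.py | __get_semantic_role
-- ===== SOURCE A (Python) =====
-- def __get_semantic_role(words, tags):
--     semantic_role = []
--     index = 0
--     while index < len(tags):
--         if tags[index].startswith('B'):
--             role = tags[index][2:]
--             if role != 'V':
--                 phrase = ""
--                 while index < len(tags) and tags[index] != 'O':
--                     phrase += words[index] + " "
--                     index += 1
--                 semantic_role.append((phrase.strip(), role))
--         index += 1
--     return semantic_role
-- ===== SOURCE B (Python) =====
-- def __get_semantic_role(words, tags):
--     # B: two staged passes -- first partition the tag indices into maximal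
--     # runs of non-'O' tags, then for each run take the first qualifying
--     # B-tag and join the words of the rest of the run.
--     n = len(tags)
--     runs = []
--     i = 0
--     while i < n:
--         if tags[i] == 'O':
--             i += 1
--         else:
--             j = i
--             while j < n and tags[j] != 'O':
--                 j += 1
--             runs.append((i, j))
--             i = j
--     out = []
--     for start, end in runs:
--         for k in range(start, end):
--             t = tags[k]
--             if t.startswith('B') and t[2:] != 'V':
--                 phrase = ' '.join(words[idx] for idx in range(k, end)).strip()
--                 out.append((phrase, t[2:]))
--                 break
--     return out
-- ===== Notes on version B (the rewrite author's own statement) =====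
-- stated objective: alternative
-- what changed: B replaces A's single while-loop with a nested, index-sharing phrase-accumulating inner loop by two staged passes: it first partitions the tag indices into maximal non-'O' runs, then for each run finds the first B-tag with role != 'V' and builds the phrase with ' '.join over the individually indexed words of the rest of the run.
import Mathlib
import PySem

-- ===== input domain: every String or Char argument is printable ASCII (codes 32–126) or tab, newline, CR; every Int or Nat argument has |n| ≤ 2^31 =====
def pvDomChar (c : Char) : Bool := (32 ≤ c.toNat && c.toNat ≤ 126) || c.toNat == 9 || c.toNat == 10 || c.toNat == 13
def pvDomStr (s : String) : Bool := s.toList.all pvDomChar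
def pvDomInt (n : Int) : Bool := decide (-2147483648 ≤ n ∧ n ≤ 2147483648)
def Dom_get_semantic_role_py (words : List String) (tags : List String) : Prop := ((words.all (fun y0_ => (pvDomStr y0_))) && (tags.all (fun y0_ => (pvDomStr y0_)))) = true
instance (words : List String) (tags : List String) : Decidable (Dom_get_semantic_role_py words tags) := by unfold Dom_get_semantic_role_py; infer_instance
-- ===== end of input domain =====

-- B restructures A's single nested while loop into two staged passes (run partition, then per-run scan + join);
-- equal return value on Pre_ (Pre_ excludes exactly the inputs where the Python raises IndexError — both A and B do).

-- ===== PORT A =====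
-- inner loop: "while index < len(tags) and tags[index] != 'O': phrase += words[index] + ' '; index += 1"
-- (words[index] is ported as pyGetD with default ""; Pre_ guarantees the index is in range wherever this is reached)
def srlPhrase (words tags : List String) (index : Nat) (phrase : List Char) : List Char × Nat :=
  if h : index < tags.length ∧ PySem.List.pyGetD tags (index : Int) "" ≠ "O" then
    srlPhrase words tags (index + 1)
      (phrase ++ (PySem.List.pyGetD words (index : Int) "").toList ++ [' '])
  else (phrase, index)
termination_by tags.length - index
decreasing_by have := h.1; omega

-- the inner loop never moves the index backwards (cited by srlLoop's decreasing_by)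
lemma le_srlPhrase_snd (words tags : List String) (index : Nat) (phrase : List Char) :
    index ≤ (srlPhrase words tags index phrase).2 := by
  fun_induction srlPhrase words tags index phrase with
  | case1 index phrase h ih => omega
  | case2 index phrase h => simp

-- outer loop of A, with the running index and the accumulated result list
def srlLoop (words tags : List String) (index : Nat) (acc : List (String × String)) :
    List (String × String) :=
  if hlt : index < tags.length then
    if PySem.Str.startswith (PySem.List.pyGetD tags (index : Int) "") "B" then
      if PySem.Str.slice (PySem.List.pyGetD tags (index : Int) "") (some 2) none ≠ "V" then
        srlLoop words tags ((srlPhrase words tags index []).2 + 1)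
          (acc ++ [(String.ofList (PySem.Chars.strip (srlPhrase words tags index []).1),
            PySem.Str.slice (PySem.List.pyGetD tags (index : Int) "") (some 2) none)])
      else srlLoop words tags (index + 1) acc
    else srlLoop words tags (index + 1) acc
  else acc
termination_by tags.length + 1 - index
decreasing_by
  · have := le_srlPhrase_snd words tags index []; omega
  · omega
  · omega

def get_semantic_role_py (words : List String) (tags : List String) : List (String × String) :=
  srlLoop words tags 0 []

-- ===== PORT B =====
-- "j = i; while j < n and tags[j] != 'O': j += 1"
def srlRunEnd (tags : List String) (j : Nat) : Nat :=
  if h : j < tags.length ∧ PySem.List.pyGetD tags (j : Int) "" ≠ "O" then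
    srlRunEnd tags (j + 1)
  else j
termination_by tags.length - j
decreasing_by have := h.1; omega

-- the run-end scan never moves backwards (cited by srlRuns's decreasing_by)
lemma le_srlRunEnd (tags : List String) (j : Nat) : j ≤ srlRunEnd tags j := by
  fun_induction srlRunEnd tags j with
  | case1 j h ih => omega
  | case2 j h => omega

-- pass 1 of B: the list of maximal runs of non-'O' tags, as (start, end) index pairs
def srlRuns (tags : List String) (i : Nat) : List (Nat × Nat) :=
  if hlt : i < tags.length then
    if PySem.List.pyGetD tags (i : Int) "" = "O" then srlRuns tags (i + 1)
    else (i, srlRunEnd tags i) :: srlRuns tags (srlRunEnd tags i)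
  else []
termination_by tags.length - i
decreasing_by
  · omega
  · have h1 : i + 1 ≤ srlRunEnd tags i := by
      rw [srlRunEnd, dif_pos ⟨hlt, by assumption⟩]; exact le_srlRunEnd tags (i + 1)
    omega

-- pass 2 of B, per run: "for k in range(start, end): if qualifying B: append joined phrase; break"
def srlScan (words tags : List String) (e k : Nat) : List (String × String) :=
  if hk : k < e then
    if PySem.Str.startswith (PySem.List.pyGetD tags (k : Int) "") "B" = true ∧
        PySem.Str.slice (PySem.List.pyGetD tags (k : Int) "") (some 2) none ≠ "V" then
      [(PySem.Str.strip (PySem.Str.join " "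
          ((PySem.List.pyRange (k : Int) (e : Int)).map
            (fun idx => PySem.List.pyGetD words idx ""))),
        PySem.Str.slice (PySem.List.pyGetD tags (k : Int) "") (some 2) none)]
    else srlScan words tags e (k + 1)
  else []
termination_by e - k

def get_semantic_role_py_alt (words : List String) (tags : List String) : List (String × String) :=
  (srlRuns tags 0).foldl (fun acc r => acc ++ srlScan words tags r.2 r.1) []

-- ===== PRECONDITION & SPEC =====
-- Pre_ excludes exactly the inputs on which the Python A raises IndexError: those where some tag
-- index k that the phrase-building loop reaches (k is in a run of non-'O' tags at or after a B-tag
-- whose role is not 'V') has no corresponding word. B's Python raises IndexError on the same inputs.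
def Pre_get_semantic_role_py (words : List String) (tags : List String) : Prop :=
  ∀ k ∈ List.range tags.length, ∀ j ∈ List.range (k + 1),
    (PySem.Str.startswith (PySem.List.pyGetD tags (j : Int) "") "B" ∧
      PySem.Str.slice (PySem.List.pyGetD tags (j : Int) "") (some 2) none ≠ "V") →
    (∀ m ∈ List.range (k + 1), j ≤ m → PySem.List.pyGetD tags (m : Int) "" ≠ "O") →
    k < words.length
instance (words : List String) (tags : List String) : Decidable (Pre_get_semantic_role_py words tags) := by
  unfold Pre_get_semantic_role_py; infer_instance

def pvWitness_get_semantic_role_py : List String × List String :=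
  (["John", "eats", "fast"], ["B-A0", "I-A0", "O"])

def Spec_get_semantic_role_py (words : List String) (tags : List String) (out : List (String × String)) : Prop :=
  out = get_semantic_role_py_alt words tags
instance (words : List String) (tags : List String) (out : List (String × String)) :
    Decidable (Spec_get_semantic_role_py words tags out) := by
  unfold Spec_get_semantic_role_py; infer_instance

-- ===== CLAIM (what is proved, stated in full; the proofs are below) =====
def Claim_equal_get_semantic_role_py : Prop :=
  ∀ (words : List String) (tags : List String), Dom_get_semantic_role_py words tags →
    Pre_get_semantic_role_py words tags →
    Spec_get_semantic_role_py words tags (get_semantic_role_py words tags)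

-- ===== LEMMAS AND PROOFS =====

-- stripping is unaffected by a trailing blank (helper for strip_append_space)
lemma rstrip_append_space (xs : List Char) :
    PySem.Chars.rstrip (xs ++ [' ']) = PySem.Chars.rstrip xs := by
  have hsp : PySem.Chars.isspace ' ' = true := by decide
  simp [PySem.Chars.rstrip, hsp]

-- stripping is unaffected by a trailing blank
lemma strip_append_space (xs : List Char) :
    PySem.Chars.strip (xs ++ [' ']) = PySem.Chars.strip xs := by
  have hsp : PySem.Chars.isspace ' ' = true := by decide
  simp only [PySem.Chars.strip, PySem.Chars.lstrip, List.dropWhile_append]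
  split
  · rename_i hemp
    simp [hsp, List.isEmpty_iff.mp hemp]
  · exact rstrip_append_space _

-- A's phrase (each word followed by a blank, concatenated) is B's join plus one trailing blank
lemma flatten_words_eq_join : ∀ (ws : List String), ws ≠ [] →
    (ws.map (fun w => w.toList ++ [' '])).flatten =
      PySem.Chars.join [' '] (ws.map String.toList) ++ [' '] := by
  intro ws
  induction ws with
  | nil => simp
  | cons w rest ih =>
    intro _
    cases rest with
    | nil => simp [PySem.Chars.join_singleton]
    | cons w2 r2 =>
      calc ((w :: w2 :: r2).map (fun w => w.toList ++ [' '])).flatten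
          = (w.toList ++ [' ']) ++ ((w2 :: r2).map (fun w => w.toList ++ [' '])).flatten := by
            simp [List.append_assoc]
        _ = (w.toList ++ [' ']) ++
              (PySem.Chars.join [' '] ((w2 :: r2).map String.toList) ++ [' ']) := by
            rw [ih (by simp)]
        _ = PySem.Chars.join [' '] ((w :: w2 :: r2).map String.toList) ++ [' '] := by
            simp only [List.map_cons, PySem.Chars.join_cons_cons, List.append_assoc]

-- the two phrase strings agree after stripping
lemma phrase_strings_eq (words : List String) (k e : Nat) (hke : k < e) :
    String.ofList (PySem.Chars.strip
        (((List.range' k (e - k)).map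
          (fun (m : Nat) => (PySem.List.pyGetD words ((m : Int)) "").toList ++ [' '])).flatten)) =
      PySem.Str.strip (PySem.Str.join " "
        ((PySem.List.pyRange (k : Int) (e : Int)).map
          (fun idx => PySem.List.pyGetD words idx ""))) := by
  have hsep : (" " : String).toList = [' '] := by decide
  have hr : PySem.List.pyRange (k : Int) (e : Int) =
      (List.range (e - k)).map (fun i => ((k + i : Nat) : Int)) := by
    rw [PySem.List.pyRange_one]
    have ht : ((e : Int) - (k : Int)).toNat = e - k := by omega
    rw [ht]
    apply List.map_congr_left
    intro i _
    push_cast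
    ring
  have hws : (PySem.List.pyRange (k : Int) (e : Int)).map
      (fun idx => PySem.List.pyGetD words idx "") =
      (List.range' k (e - k)).map (fun (m : Nat) => PySem.List.pyGetD words ((m : Int)) "") := by
    rw [hr, List.range'_eq_map_range, List.map_map, List.map_map]
    rfl
  have hne : (List.range' k (e - k)).map
      (fun (m : Nat) => PySem.List.pyGetD words ((m : Int)) "") ≠ [] := by
    intro h
    have := congrArg List.length h
    simp [List.length_range'] at this
    omega
  have h2 : (List.range' k (e - k)).map
      (fun (m : Nat) => (PySem.List.pyGetD words ((m : Int)) "").toList ++ [' ']) =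
      ((List.range' k (e - k)).map (fun (m : Nat) => PySem.List.pyGetD words ((m : Int)) "")).map
        (fun w => w.toList ++ [' ']) := by
    rw [List.map_map]
    rfl
  have key : (PySem.Str.strip (PySem.Str.join " "
      ((PySem.List.pyRange (k : Int) (e : Int)).map
        (fun idx => PySem.List.pyGetD words idx "")))).toList =
      PySem.Chars.strip
        (((List.range' k (e - k)).map
          (fun (m : Nat) => (PySem.List.pyGetD words ((m : Int)) "").toList ++ [' '])).flatten) := by
    rw [PySem.Str.toList_strip, PySem.Str.toList_join, hsep, hws, h2,
      flatten_words_eq_join _ hne, strip_append_space]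
  rw [← key]
  generalize PySem.Str.strip (PySem.Str.join " "
      ((PySem.List.pyRange (k : Int) (e : Int)).map
        (fun idx => PySem.List.pyGetD words idx ""))) = s
  simp

-- where the run-end scan stops: at the end of the tags, or on an 'O' tag
lemma srlRunEnd_stop (tags : List String) (j : Nat) :
    j ≤ tags.length →
    (srlRunEnd tags j = tags.length ∨
      (srlRunEnd tags j < tags.length ∧
        PySem.List.pyGetD tags ((srlRunEnd tags j : Nat) : Int) "" = "O")) := by
  fun_induction srlRunEnd tags j with
  | case1 j h ih =>
    intro _
    exact ih (by omega)
  | case2 j h =>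
    intro hj
    rcases Nat.lt_or_ge j tags.length with hlt | hge
    · right
      refine ⟨hlt, ?_⟩
      by_contra hne
      exact h ⟨hlt, hne⟩
    · left
      omega

-- no 'O' tag strictly inside a run
lemma srlRunEnd_no_O (tags : List String) (j : Nat) :
    ∀ m, j ≤ m → m < srlRunEnd tags j → PySem.List.pyGetD tags (m : Int) "" ≠ "O" := by
  fun_induction srlRunEnd tags j with
  | case1 j h ih =>
    intro m hjm hlt
    rcases Nat.eq_or_lt_of_le hjm with rfl | hlt2
    · exact h.2
    · exact ih m (by omega) hlt
  | case2 j h =>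
    intro m h1 h2
    omega

-- a run is nonempty when it starts on a non-'O' tag
lemma lt_srlRunEnd (tags : List String) (i : Nat) (hlt : i < tags.length)
    (hO : PySem.List.pyGetD tags (i : Int) "" ≠ "O") : i < srlRunEnd tags i := by
  rw [srlRunEnd, dif_pos ⟨hlt, hO⟩]
  have := le_srlRunEnd tags (i + 1)
  omega

-- the inner while loop of A consumes exactly the run [k, e) and returns the concatenated phrase
lemma srlPhrase_eq (words tags : List String) (e : Nat)
    (he : e = tags.length ∨ (e < tags.length ∧ PySem.List.pyGetD tags (e : Int) "" = "O"))
    (hle : e ≤ tags.length) :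
    ∀ n k phrase, e - k ≤ n → k ≤ e →
    (∀ m, k ≤ m → m < e → PySem.List.pyGetD tags (m : Int) "" ≠ "O") →
    srlPhrase words tags k phrase =
      (phrase ++ ((List.range' k (e - k)).map
        (fun (m : Nat) => (PySem.List.pyGetD words ((m : Int)) "").toList ++ [' '])).flatten, e) := by
  have hbase : ∀ phrase, srlPhrase words tags e phrase =
      (phrase ++ ((List.range' e (e - e)).map
        (fun (m : Nat) => (PySem.List.pyGetD words ((m : Int)) "").toList ++ [' '])).flatten, e) := by
    intro phrase
    rw [srlPhrase]
    rcases he with rfl | ⟨hlt, hO⟩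
    · rw [dif_neg (by simp)]
      simp
    · rw [dif_neg (by simp [hO])]
      simp
  intro n
  induction n with
  | zero =>
    intro k phrase hb hk hno
    have hke : k = e := by omega
    subst hke
    exact hbase phrase
  | succ n ih =>
    intro k phrase hb hk hno
    rcases Nat.eq_or_lt_of_le hk with rfl | hke
    · exact hbase phrase
    · have hklen : k < tags.length := by omega
      have hkO : PySem.List.pyGetD tags (k : Int) "" ≠ "O" := hno k (le_refl k) hke
      rw [srlPhrase, dif_pos ⟨hklen, hkO⟩]
      rw [ih (k + 1) _ (by omega) (by omega) (fun m h1 h2 => hno m (by omega) h2)]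
      have hrange : List.range' k (e - k) = k :: List.range' (k + 1) (e - (k + 1)) := by
        have h1 : e - k = (e - (k + 1)) + 1 := by omega
        rw [h1, List.range'_succ]
      rw [hrange]
      simp [List.append_assoc]

-- over one run [k, e), A's outer loop appends exactly B's per-run scan result, then resumes at e+1
lemma srlLoop_run (words tags : List String) (e : Nat)
    (he : e = tags.length ∨ (e < tags.length ∧ PySem.List.pyGetD tags (e : Int) "" = "O"))
    (hle : e ≤ tags.length) :
    ∀ n k acc, e - k ≤ n → k ≤ e →
    (∀ m, k ≤ m → m < e → PySem.List.pyGetD tags (m : Int) "" ≠ "O") →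
    srlLoop words tags k acc =
      srlLoop words tags (e + 1) (acc ++ srlScan words tags e k) := by
  have hbase : ∀ acc, srlLoop words tags e acc =
      srlLoop words tags (e + 1) (acc ++ srlScan words tags e e) := by
    intro acc
    rw [srlScan, dif_neg (by omega), List.append_nil]
    rcases he with rfl | ⟨hlt, hO⟩
    · rw [srlLoop, dif_neg (by simp), srlLoop, dif_neg (by omega)]
    · rw [srlLoop, dif_pos hlt]
      have hsw : PySem.Str.startswith (PySem.List.pyGetD tags (e : Int) "") "B" = false := by
        rw [hO]; decide
      simp only [hsw, Bool.false_eq_true, if_false]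
  intro n
  induction n with
  | zero =>
    intro k acc hb hk hno
    have hke : k = e := by omega
    subst hke
    exact hbase acc
  | succ n ih =>
    intro k acc hb hk hno
    rcases Nat.eq_or_lt_of_le hk with rfl | hke
    · exact hbase acc
    · have hklen : k < tags.length := by omega
      have hkO : PySem.List.pyGetD tags (k : Int) "" ≠ "O" := hno k (le_refl k) hke
      rw [srlLoop, dif_pos hklen]
      by_cases hB : PySem.Str.startswith (PySem.List.pyGetD tags (k : Int) "") "B" = true
      · rw [if_pos hB]
        by_cases hV :
            PySem.Str.slice (PySem.List.pyGetD tags (k : Int) "") (some 2) none ≠ "V"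
        · rw [if_pos hV,
            srlPhrase_eq words tags e he hle (e - k) k [] (le_refl _) (by omega) hno,
            srlScan, dif_pos hke, if_pos ⟨hB, hV⟩]
          rw [show ((([] : List Char) ++ ((List.range' k (e - k)).map
              (fun (m : Nat) => (PySem.List.pyGetD words ((m : Int)) "").toList ++ [' '])).flatten,
              e) : List Char × Nat).1 = (((List.range' k (e - k)).map
              (fun (m : Nat) => (PySem.List.pyGetD words ((m : Int)) "").toList ++ [' '])).flatten)
            from by simp]
          rw [phrase_strings_eq words k e hke]
        · rw [if_neg hV, srlScan, dif_pos hke, if_neg (fun hc => hV hc.2)]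
          exact ih (k + 1) acc (by omega) (by omega) (fun m h1 h2 => hno m (by omega) h2)
      · rw [if_neg hB, srlScan, dif_pos hke, if_neg (fun hc => hB hc.1)]
        exact ih (k + 1) acc (by omega) (by omega) (fun m h1 h2 => hno m (by omega) h2)

-- skipping past a run boundary does not change the remaining run list
lemma srlRuns_boundary (tags : List String) (e : Nat)
    (he : e = tags.length ∨ (e < tags.length ∧ PySem.List.pyGetD tags (e : Int) "" = "O")) :
    srlRuns tags e = srlRuns tags (e + 1) := by
  rcases he with rfl | ⟨hlt, hO⟩
  · rw [srlRuns, dif_neg (by omega), srlRuns, dif_neg (by omega)]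
  · rw [srlRuns, dif_pos hlt, if_pos hO]

-- A's loop from any index produces the concatenation of B's per-run results from that index
lemma srlLoop_eq_runs (words tags : List String) :
    ∀ n i acc, tags.length + 1 - i ≤ n →
    srlLoop words tags i acc =
      acc ++ (srlRuns tags i).flatMap (fun r => srlScan words tags r.2 r.1) := by
  intro n
  induction n with
  | zero =>
    intro i acc hb
    have hge : ¬ i < tags.length := by omega
    rw [srlLoop, dif_neg hge, srlRuns, dif_neg hge]
    simp
  | succ n ih =>
    intro i acc hb
    by_cases hlen : i < tags.length
    · by_cases hO : PySem.List.pyGetD tags (i : Int) "" = "O"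
      · rw [srlRuns, dif_pos hlen, if_pos hO]
        rw [srlLoop, dif_pos hlen]
        have hsw : PySem.Str.startswith (PySem.List.pyGetD tags (i : Int) "") "B" = false := by
          rw [hO]; decide
        simp only [hsw, Bool.false_eq_true, if_false]
        exact ih (i + 1) acc (by omega)
      · have hgt : i < srlRunEnd tags i := lt_srlRunEnd tags i hlen hO
        have he := srlRunEnd_stop tags i (by omega)
        have hle : srlRunEnd tags i ≤ tags.length := by
          rcases he with h | h
          · omega
          · omega
        rw [srlRuns, dif_pos hlen, if_neg hO]
        rw [srlLoop_run words tags (srlRunEnd tags i) he hle (srlRunEnd tags i - i) i acc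
          (le_refl _) (by omega) (srlRunEnd_no_O tags i)]
        rw [ih (srlRunEnd tags i + 1) _ (by omega)]
        rw [← srlRuns_boundary tags (srlRunEnd tags i) he]
        simp [List.append_assoc]
    · rw [srlLoop, dif_neg hlen, srlRuns, dif_neg hlen]
      simp

-- ===== VERDICT (by name: the statement is the Claim_ definition above) =====
theorem get_semantic_role_py_spec : Claim_equal_get_semantic_role_py := by
  intro words tags _dom _pre
  unfold Spec_get_semantic_role_py get_semantic_role_py get_semantic_role_py_alt
  rw [PySem.List.foldl_append_eq_flatMap]
  simpa using srlLoop_eq_runs words tags (tags.length + 1) 0 [] (by omega)
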